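-- pv_equiv track=rewrite | github.com/kacerr/bulls_cows | game.py | is_string_valid_bulls_cows_number
-- ===== SOURCE A (Python) =====
-- def is_string_valid_bulls_cows_number(string_value):
--   if not string_value.isnumeric or len(string_value) != 4:
--     return False
--
--   for i in range(4):
--     if i==0:
--       if string_value[i] in string_value[1:]:
--         return False
--     else:
--       if string_value[i] in (string_value[:i-1] + string_value[i+1:]):
--         return False
--   return True
-- ===== SOURCE B (Python) =====
-- def is_string_valid_bulls_cows_number(string_value):
--   # Guard kept semantically: `string_value.isnumeric` (uncalled) is always truthy,
--   # so the original guard only rejects strings whose length is not 4.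
--   return len(string_value) == 4 and len(set(string_value)) == 4
-- ===== Notes on version B (the rewrite author's own statement) =====
-- stated objective: simpler
-- what changed: Replaces the off-by-one nested slice-membership loop (whose overlapping slices happen to test all 6 digit pairs) with a single distinctness test: build a set of the characters and compare its size to 4.
import Mathlib
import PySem

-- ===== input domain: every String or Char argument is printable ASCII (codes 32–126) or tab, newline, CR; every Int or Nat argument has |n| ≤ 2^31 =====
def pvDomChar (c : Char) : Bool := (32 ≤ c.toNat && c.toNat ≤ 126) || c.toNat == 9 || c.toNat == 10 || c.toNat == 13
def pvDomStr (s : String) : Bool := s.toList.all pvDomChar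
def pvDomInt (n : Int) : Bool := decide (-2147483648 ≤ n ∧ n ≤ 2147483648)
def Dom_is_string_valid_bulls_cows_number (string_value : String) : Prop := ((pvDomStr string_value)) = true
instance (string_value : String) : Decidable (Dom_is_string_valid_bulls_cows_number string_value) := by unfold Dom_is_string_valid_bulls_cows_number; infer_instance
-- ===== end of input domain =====

-- B replaces the nested slice-membership loop with a single distinctness test (set size == 4): simpler.

-- ===== PORT A =====
-- `not string_value.isnumeric` tests the truthiness of the (uncalled) bound method, which is
-- always truthy in Python, so the guard reduces exactly to `len(string_value) != 4`.
-- `string_value[i] in <string>` with a one-character string on the left is char membership (exact here).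
def is_string_valid_bulls_cows_number (string_value : String) : Bool :=
  let l := string_value.toList
  if l.length ≠ 4 then false
  else
    -- the for-loop returns False as soon as one check fires, else True
    (PySem.List.pyRange 0 4 1).all (fun i =>
      if i == 0 then
        !(match PySem.List.pyGet? l i with
          | some c => (PySem.List.slice l (some 1) none).contains c
          | none => true)
      else
        !(match PySem.List.pyGet? l i with
          | some c => (PySem.List.slice l none (some (i-1)) ++ PySem.List.slice l (some (i+1)) none).contains c
          | none => true))

-- ===== PORT B =====
def is_string_valid_bulls_cows_number_alt (string_value : String) : Bool :=
  (PySem.Str.len string_value == 4) &&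
    (PySem.Set.len (PySem.Set.ofList string_value.toList) == 4)

-- ===== PRECONDITION & SPEC =====
def Spec_is_string_valid_bulls_cows_number (string_value : String) (out : Bool) : Prop := out = is_string_valid_bulls_cows_number_alt string_value
instance (string_value : String) (out : Bool) : Decidable (Spec_is_string_valid_bulls_cows_number string_value out) := by unfold Spec_is_string_valid_bulls_cows_number; infer_instance

-- ===== CLAIM (what is proved, stated in full; the proofs are below) =====
def Claim_equal_is_string_valid_bulls_cows_number : Prop := ∀ (string_value : String), Dom_is_string_valid_bulls_cows_number string_value → Spec_is_string_valid_bulls_cows_number string_value (is_string_valid_bulls_cows_number string_value)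

-- ===== LEMMAS AND PROOFS =====

-- Length-4 case: on four explicit characters both ports reduce to boolean combinations of the
-- six pairwise (dis)equalities; case-split on those and close each case by evaluation.
theorem pv_key (s : String) (a b c d : Char) (hs : s.toList = [a, b, c, d]) :
    is_string_valid_bulls_cows_number s = is_string_valid_bulls_cows_number_alt s := by
  have hr : PySem.List.pyRange 0 4 1 = [0, 1, 2, 3] := by decide
  simp only [is_string_valid_bulls_cows_number, is_string_valid_bulls_cows_number_alt,
    hs, hr, PySem.Str.len_eq]
  simp [PySem.List.pyGet?, PySem.List.pyIdx?, PySem.List.slice, PySem.List.clampIdx,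
    PySem.Set.ofList, PySem.Set.add, PySem.Set.len]
  by_cases h1 : b = a <;> by_cases h2 : c = a <;> by_cases h3 : d = a <;>
    by_cases h4 : c = b <;> by_cases h5 : d = b <;> by_cases h6 : d = c <;>
    simp_all <;>
    exact ⟨⟨fun h => h1 h.symm, fun h => h2 h.symm, fun h => h3 h.symm⟩,
      ⟨fun h => h4 h.symm, fun h => h5 h.symm⟩, fun h => h6 h.symm⟩

-- ===== VERDICT (by name: the statement is the Claim_ definition above) =====
theorem is_string_valid_bulls_cows_number_spec : Claim_equal_is_string_valid_bulls_cows_number := by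
  intro s _
  unfold Spec_is_string_valid_bulls_cows_number
  match hs : s.toList with
  | [a, b, c, d] => exact pv_key s a b c d hs
  | [] | [_] | [_, _] | [_, _, _] =>
      simp [is_string_valid_bulls_cows_number, is_string_valid_bulls_cows_number_alt,
        hs, PySem.Str.len_eq]
  | a :: b :: c :: d :: e :: t =>
      simp [is_string_valid_bulls_cows_number, is_string_valid_bulls_cows_number_alt,
        hs, PySem.Str.len_eq]
      omega
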